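-- pv_equiv track=rewrite | github.com/goncalobraga27/TP_PL2023 | conversorTOMLtoJSON.py | levelsData
-- ===== SOURCE A (Python) =====
-- def levelsData(data):
--     resultado = []
--     level = ""
--     inComa = 0
--     for it in data:
--         if it == '\"':
--             inComa = 1
--         elif it != '.' and inComa == 0:
--             level += it
--         elif it != '.' and inComa == 1:
--             level += it
--         elif it == '.' and inComa == 0:
--             resultado.append(level)
--             level = ""
--         elif it == '.' and inComa == 1:
--             level += it
--     resultado.append(level)
--     return resultado
-- ===== SOURCE B (Python) =====
-- def levelsData(data):
--     q = data.find('"')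
--     if q == -1:
--         return data.split('.')
--     head = data[:q].split('.')
--     tail = data[q:].replace('"', '')
--     head[-1] += tail
--     return head
-- ===== Notes on version B (the rewrite author's own statement) =====
-- stated objective: simpler
-- what changed: A's per-character five-branch state machine with a never-resetting quote latch is replaced by three C-implemented library calls: split the part before the first quote on dots, strip all quote characters from the rest, and append that rest to the last segment.
import Mathlib
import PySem

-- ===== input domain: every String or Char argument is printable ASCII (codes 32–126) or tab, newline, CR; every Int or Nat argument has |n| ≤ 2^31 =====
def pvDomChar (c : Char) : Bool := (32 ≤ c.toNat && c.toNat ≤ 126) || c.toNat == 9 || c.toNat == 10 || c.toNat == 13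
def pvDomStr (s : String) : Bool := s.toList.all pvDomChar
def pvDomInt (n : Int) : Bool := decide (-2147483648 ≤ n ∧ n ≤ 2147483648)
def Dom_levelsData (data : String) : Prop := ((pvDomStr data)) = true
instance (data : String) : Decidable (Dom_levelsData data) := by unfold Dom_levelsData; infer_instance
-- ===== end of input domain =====

-- B replaces A's five-branch per-character state machine by three library calls: split on dots
-- before the first quote, strip quotes from the rest, glue the rest onto the last segment.

-- ===== PORT A =====
-- one step of A's loop body; the state is (resultado, level, inComa)
def levelsData_step (st : List String × String × Int) (it : Char) : List String × String × Int :=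
  if it = '"' then (st.1, st.2.1, 1)
  else if it ≠ '.' ∧ st.2.2 = 0 then (st.1, st.2.1.push it, st.2.2)
  else if it ≠ '.' ∧ st.2.2 = 1 then (st.1, st.2.1.push it, st.2.2)
  else if it = '.' ∧ st.2.2 = 0 then (st.1 ++ [st.2.1], "", st.2.2)
  else if it = '.' ∧ st.2.2 = 1 then (st.1, st.2.1.push it, st.2.2)
  else st  -- no elif matches: Python does nothing

def levelsData (data : String) : List String :=
  let st := data.toList.foldl levelsData_step ([], "", 0)
  st.1 ++ [st.2.1]

-- ===== PORT B =====
def levelsData_alt (data : String) : List String :=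
  let q := PySem.Str.find data "\""
  if q = -1 then (PySem.Str.split? data ".").getD []
  else
    let head := (PySem.Str.split? (PySem.Str.slice data none (some q)) ".").getD []
    let tail := PySem.Str.replace (PySem.Str.slice data (some q) none) "\"" ""
    -- head[-1] += tail  (head is never empty: split never returns an empty list)
    head.dropLast ++ [head.getLastD "" ++ tail]

-- ===== PRECONDITION & SPEC =====
def Spec_levelsData (data : String) (out : List String) : Prop := out = levelsData_alt data
instance (data : String) (out : List String) : Decidable (Spec_levelsData data out) := by unfold Spec_levelsData; infer_instance

-- ===== CLAIM (what is proved, stated in full; the proofs are below) =====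
def Claim_equal_levelsData : Prop := ∀ (data : String), Dom_levelsData data → Spec_levelsData data (levelsData data)

-- ===== LEMMAS AND PROOFS =====

-- reference functions on List Char
def consHd (c : Char) : List (List Char) → List (List Char)
  | [] => [[c]]
  | h :: t => (c :: h) :: t

def prepHd (p : List Char) : List (List Char) → List (List Char)
  | [] => [p]
  | h :: t => (p ++ h) :: t

def appLast (t : List Char) : List (List Char) → List (List Char)
  | [] => [t]
  | [h] => [h ++ t]
  | h :: r => h :: appLast t r

-- plain split on '.'
def splitD : List Char → List (List Char)
  | [] => [[]]
  | c :: r => if c = '.' then [] :: splitD r else consHd c (splitD r)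

-- the latched splitter A computes
def refA : List Char → List (List Char)
  | [] => [[]]
  | c :: r =>
    if c = '"' then [r.filter (· ≠ '"')]
    else if c = '.' then [] :: refA r
    else consHd c (refA r)

lemma splitD_ne_nil (l : List Char) : splitD l ≠ [] := by
  cases l with
  | nil => simp [splitD]
  | cons c r =>
    by_cases h : c = '.'
    · simp [splitD, h]
    · simp only [splitD, if_neg h]
      cases splitD r <;> simp [consHd]

lemma refA_ne_nil (l : List Char) : refA l ≠ [] := by
  cases l with
  | nil => simp [refA]
  | cons c r =>
    by_cases h : c = '"' <;> by_cases h2 : c = '.' <;>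
      (simp [refA, h, h2]; try (cases refA r <;> simp [consHd]))

-- ===== A-side characterisation =====
lemma foldA_one (cs : List Char) : ∀ (res : List String) (lvl : String),
    (cs.foldl levelsData_step (res, lvl, 1)).1 ++ [(cs.foldl levelsData_step (res, lvl, 1)).2.1]
      = res ++ [String.ofList (lvl.toList ++ cs.filter (· ≠ '"'))] := by
  induction cs with
  | nil => intro res lvl; simp
  | cons c t ih =>
    intro res lvl
    by_cases h : c = '"'
    · simp [List.foldl_cons, levelsData_step, h, ih]
    · by_cases h2 : c = '.' <;>
        simp [List.foldl_cons, levelsData_step, h, h2, ih]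

lemma foldA_zero (cs : List Char) : ∀ (res : List String) (lvl : String),
    (cs.foldl levelsData_step (res, lvl, 0)).1 ++ [(cs.foldl levelsData_step (res, lvl, 0)).2.1]
      = res ++ (prepHd lvl.toList (refA cs)).map String.ofList := by
  induction cs with
  | nil => intro res lvl; simp [refA, prepHd]
  | cons c t ih =>
    intro res lvl
    rw [List.foldl_cons]
    by_cases h : c = '"'
    · rw [show levelsData_step (res, lvl, 0) c = (res, lvl, 1) by simp [levelsData_step, h]]
      rw [foldA_one]
      simp [refA, h, prepHd]
    · by_cases h2 : c = '.'
      · rw [show levelsData_step (res, lvl, 0) c = (res ++ [lvl], "", 0) by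
          simp [levelsData_step, h2]]
        rw [ih]
        obtain ⟨hd, tl, he⟩ : ∃ hd tl, refA t = hd :: tl := by
          cases hh : refA t with
          | nil => exact absurd hh (refA_ne_nil t)
          | cons a b => exact ⟨a, b, rfl⟩
        simp [refA, h2, he, prepHd]
      · rw [show levelsData_step (res, lvl, 0) c = (res, lvl.push c, 0) by
          simp [levelsData_step, h, h2]]
        rw [ih]
        obtain ⟨hd, tl, he⟩ : ∃ hd tl, refA t = hd :: tl := by
          cases hh : refA t with
          | nil => exact absurd hh (refA_ne_nil t)
          | cons a b => exact ⟨a, b, rfl⟩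
        simp [refA, h, h2, he, prepHd, consHd]

lemma levelsData_eq_refA (data : String) :
    levelsData data = (refA data.toList).map String.ofList := by
  show (data.toList.foldl levelsData_step ([], "", 0)).1 ++ _ = _
  rw [foldA_zero]
  obtain ⟨hd, tl, he⟩ : ∃ hd tl, refA data.toList = hd :: tl := by
    cases hh : refA data.toList with
    | nil => exact absurd hh (refA_ne_nil _)
    | cons a b => exact ⟨a, b, rfl⟩
  simp [he, prepHd]

-- ===== B-side characterisation =====
lemma findgo_no (l : List Char) : ∀ k : Nat, '"' ∉ l → PySem.Chars.find.go ['"'] l k = -1 := by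
  induction l with
  | nil => intro k _; simp [PySem.Chars.find.go, List.isEmpty]
  | cons c t ih =>
    intro k h
    rw [PySem.Chars.find.go]
    simp only [List.mem_cons, not_or] at h
    simp [List.isPrefixOf, ih (k+1) h.2, h.1]

lemma findgo_yes (l : List Char) : ∀ k : Nat, '"' ∈ l →
    PySem.Chars.find.go ['"'] l k = (k : Int) + (l.takeWhile (· ≠ '"')).length := by
  induction l with
  | nil => intro k h; simp at h
  | cons c t ih =>
    intro k h
    rw [PySem.Chars.find.go]
    by_cases hc : c = '"'
    · simp [List.isPrefixOf, hc]
    · have ht : '"' ∈ t := by simpa [hc, Ne.symm hc] using h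
      simp [List.isPrefixOf, Ne.symm hc, hc, ih (k+1) ht]
      ring

lemma splitgo (fuel : Nat) : ∀ (l : List Char), l.length ≤ fuel → ∀ (cur : List Char) (acc : List (List Char)),
    PySem.Chars.splitOn.go ['.'] fuel l cur acc = acc.reverse ++ prepHd cur.reverse (splitD l) := by
  induction fuel with
  | zero =>
    intro l hl cur acc
    have : l = [] := List.length_eq_zero_iff.mp (Nat.le_zero.mp hl)
    subst this
    rw [PySem.Chars.splitOn.go]
    simp [splitD, prepHd]
  | succ f ih =>
    intro l hl cur acc
    cases l with
    | nil =>
      rw [PySem.Chars.splitOn.go]; simp [splitD, prepHd]; omega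
    | cons c rest =>
      rw [PySem.Chars.splitOn.go]
      simp only [List.length_cons, Nat.succ_le_succ_iff] at hl
      by_cases hc : c = '.'
      · simp only [List.isPrefixOf, hc, Bool.and_true, beq_self_eq_true, if_pos,
          List.length_cons, List.length_nil, List.drop_succ_cons, List.drop_zero]
        rw [ih rest hl]
        obtain ⟨hd, tl, he⟩ : ∃ hd tl, splitD rest = hd :: tl := by
          cases hh : splitD rest with
          | nil => exact absurd hh (splitD_ne_nil rest)
          | cons a b => exact ⟨a, b, rfl⟩
        simp [splitD, he, prepHd]
      · have : (['.'].isPrefixOf (c :: rest)) = false := by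
          simp [List.isPrefixOf, Ne.symm hc]
        rw [this]
        simp only [Bool.false_eq_true, if_false]
        rw [ih rest hl]
        obtain ⟨hd, tl, he⟩ : ∃ hd tl, splitD rest = hd :: tl := by
          cases hh : splitD rest with
          | nil => exact absurd hh (splitD_ne_nil rest)
          | cons a b => exact ⟨a, b, rfl⟩
        simp [splitD, hc, he, prepHd, consHd]

lemma splitOn_dot (l : List Char) : PySem.Chars.splitOn l ['.'] = splitD l := by
  rw [PySem.Chars.splitOn, splitgo (l.length + 1) l (by omega)]
  obtain ⟨hd, tl, he⟩ : ∃ hd tl, splitD l = hd :: tl := by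
    cases hh : splitD l with
    | nil => exact absurd hh (splitD_ne_nil l)
    | cons a b => exact ⟨a, b, rfl⟩
  simp [he, prepHd]

lemma repgo (fuel : Nat) : ∀ (l : List Char), l.length ≤ fuel → ∀ (acc : List Char),
    PySem.Chars.replace.go ['"'] [] fuel l acc = acc.reverse ++ l.filter (· ≠ '"') := by
  induction fuel with
  | zero =>
    intro l hl acc
    have : l = [] := List.length_eq_zero_iff.mp (Nat.le_zero.mp hl)
    subst this
    rw [PySem.Chars.replace.go]; simp
  | succ f ih =>
    intro l hl acc
    cases l with
    | nil =>
      rw [PySem.Chars.replace.go]; simp; omega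
    | cons c t =>
      rw [PySem.Chars.replace.go]
      simp only [List.length_cons, Nat.succ_le_succ_iff] at hl
      by_cases hc : c = '"'
      · simp only [List.isPrefixOf, hc, Bool.and_true, beq_self_eq_true, if_pos,
          List.length_cons, List.length_nil, List.drop_succ_cons, List.drop_zero]
        rw [ih t hl]
        simp
      · have : (['"'].isPrefixOf (c :: t)) = false := by
          simp [List.isPrefixOf, Ne.symm hc]
        rw [this]
        simp only [Bool.false_eq_true, if_false]
        rw [ih t hl]
        simp [hc]

lemma replace_quote (l : List Char) : PySem.Chars.replace l ['"'] [] = l.filter (· ≠ '"') := by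
  rw [PySem.Chars.replace]
  simp only [List.isEmpty, Bool.false_eq_true, if_false]
  rw [repgo l.length l (le_refl _)]
  simp

-- ===== refA vs B's closed form =====
lemma appLast_consHd (t : List Char) (c : Char) (xs : List (List Char)) (h : xs ≠ []) :
    appLast t (consHd c xs) = consHd c (appLast t xs) := by
  cases xs with
  | nil => exact absurd rfl h
  | cons a b => cases b <;> simp [consHd, appLast]

lemma refA_no (cs : List Char) (h : '"' ∉ cs) : refA cs = splitD cs := by
  induction cs with
  | nil => rfl
  | cons c t ih =>
    simp only [List.mem_cons, not_or] at h
    by_cases hc : c = '.' <;> simp [refA, splitD, Ne.symm h.1, hc, ih h.2]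

lemma refA_yes (pre : List Char) : ∀ suf, '"' ∉ pre →
    refA (pre ++ '"' :: suf) = appLast (suf.filter (· ≠ '"')) (splitD pre) := by
  induction pre with
  | nil => intro suf _; simp [refA, splitD, appLast]
  | cons c p ih =>
    intro suf h
    simp only [List.mem_cons, not_or] at h
    by_cases hc : c = '.'
    · obtain ⟨hd, tl, he⟩ : ∃ hd tl, splitD p = hd :: tl := by
        cases hh : splitD p with
        | nil => exact absurd hh (splitD_ne_nil p)
        | cons a b => exact ⟨a, b, rfl⟩
      have := ih suf h.2
      cases tl with
      | nil => simp [refA, splitD, hc, this, he, appLast]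
      | cons x y => simp [refA, splitD, hc, this, he, appLast]

    · simp [refA, splitD, Ne.symm h.1, hc, ih suf h.2,
        appLast_consHd _ _ _ (splitD_ne_nil p)]

lemma quote_split (cs : List Char) (h : '"' ∈ cs) :
    ∃ suf, cs.dropWhile (· ≠ '"') = '"' :: suf := by
  induction cs with
  | nil => simp at h
  | cons c t ih =>
    by_cases hc : c = '"'
    · exact ⟨t, by simp [hc]⟩
    · have ht : '"' ∈ t := by simpa [hc, Ne.symm hc] using h
      obtain ⟨suf, hs⟩ := ih ht
      exact ⟨suf, by simpa [List.dropWhile_cons, hc, ne_eq] using hs⟩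

-- map ofList commutes with B's last-element surgery
lemma map_ofList_surgery (t : List Char) : ∀ (xs : List (List Char)), xs ≠ [] →
    (xs.map String.ofList).dropLast ++ [(xs.map String.ofList).getLastD "" ++ String.ofList t]
      = (appLast t xs).map String.ofList := by
  intro xs
  induction xs with
  | nil => intro h; exact absurd rfl h
  | cons a b ih =>
    intro _
    cases b with
    | nil => simp [appLast]
    | cons x y =>
      have h2 := ih (by simp)
      simp only [List.map_cons] at h2 ⊢
      rw [List.dropLast_cons_of_ne_nil (by simp), List.getLastD_cons]
      have hd : (String.ofList x :: List.map String.ofList y).getLastD (String.ofList a)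
          = (String.ofList x :: List.map String.ofList y).getLastD "" := by
        rw [List.getLastD_eq_getLast?, List.getLastD_eq_getLast?]
        cases hq : (String.ofList x :: List.map String.ofList y).getLast? with
        | none => simp [List.getLast?_eq_none_iff] at hq
        | some z => simp
      rw [hd, List.cons_append, h2]
      simp [appLast]

-- ===== assembling =====
lemma split?_getD (s : String) (L : List (List Char)) (h : PySem.Chars.splitOn s.toList ['.'] = L) :
    (PySem.Str.split? s ".").getD [] = L.map String.ofList := by
  have hb := PySem.Str.split?_map s "."
  have : PySem.Chars.split? s.toList ['.'] = some L := by
    simp [PySem.Chars.split?, h]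
  rw [show ("." : String).toList = ['.'] by decide] at hb
  rw [this] at hb
  cases hs : PySem.Str.split? s "." with
  | none => rw [hs] at hb; simp at hb
  | some v =>
    rw [hs] at hb
    simp only [Option.map_some, Option.some.injEq] at hb
    have : v = L.map String.ofList := by
      have := congrArg (List.map String.ofList) hb
      simpa [List.map_map, Function.comp_def] using this
    simp [this]

lemma levelsData_alt_eq (data : String) :
    levelsData_alt data = (refA data.toList).map String.ofList := by
  by_cases h : '"' ∈ data.toList
  · obtain ⟨suf, hsuf⟩ := quote_split data.toList h
    set pre := data.toList.takeWhile (· ≠ '"') with hpre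
    have hdec : data.toList = pre ++ '"' :: suf := by
      rw [hpre, ← hsuf, List.takeWhile_append_dropWhile]
    have hnp : '"' ∉ pre := by
      intro hm
      have := List.mem_takeWhile_imp hm
      simp at this
    have hq : PySem.Str.find data "\"" = (pre.length : Int) := by
      rw [PySem.Str.find_eq, show ("\"" : String).toList = ['"'] by decide,
        PySem.Chars.find, findgo_yes data.toList 0 h]
      simp [hpre]
    have hne : PySem.Str.find data "\"" ≠ -1 := by rw [hq]; omega
    rw [levelsData_alt]
    simp only [hq, if_neg (by omega : ¬ (pre.length : Int) = -1)]
    have hslice1 : (PySem.Str.slice data none (some (pre.length : Int))).toList = pre := by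
      rw [PySem.Str.toList_slice, PySem.Chars.slice_eq_listSlice,
        PySem.List.slice_to_natCast, hdec]
      exact List.take_left
    have hslice2 : (PySem.Str.slice data (some (pre.length : Int)) none).toList = '"' :: suf := by
      rw [PySem.Str.toList_slice, PySem.Chars.slice_eq_listSlice,
        PySem.List.slice_from_natCast, hdec]
      exact List.drop_left
    have hhead : (PySem.Str.split? (PySem.Str.slice data none (some (pre.length : Int))) ".").getD []
        = (splitD pre).map String.ofList := by
      apply split?_getD
      rw [hslice1, splitOn_dot]
    have htail : PySem.Str.replace (PySem.Str.slice data (some (pre.length : Int)) none) "\"" ""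
        = String.ofList (suf.filter (· ≠ '"')) := by
      apply String.toList_inj.mp
      rw [PySem.Str.toList_replace, hslice2,
        show ("\"" : String).toList = ['"'] by decide,
        show ("" : String).toList = [] by decide, replace_quote]
      simp
    rw [hhead, htail, map_ofList_surgery _ _ (splitD_ne_nil pre), hdec, refA_yes pre suf hnp]
  · have hq : PySem.Str.find data "\"" = -1 := by
      rw [PySem.Str.find_eq, show ("\"" : String).toList = ['"'] by decide,
        PySem.Chars.find, findgo_no data.toList 0 h]
    rw [levelsData_alt]
    simp only [hq, if_pos]
    rw [refA_no data.toList h]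
    exact split?_getD data _ (splitOn_dot _)

-- ===== VERDICT (by name: the statement is the Claim_ definition above) =====
theorem levelsData_spec : Claim_equal_levelsData := by
  intro data _
  show levelsData data = levelsData_alt data
  rw [levelsData_eq_refA, levelsData_alt_eq]
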